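-- pv_equiv track=rewrite | github.com/zhoutianlian/WTRFHMVGG | feature_engineer/advanced_features/binning_features.py | _calculate_continuous_trend
-- ===== SOURCE A (Python) =====
-- from typing import Tuple, List, Optional
--
-- def _calculate_continuous_trend(arr_num: List[int]) -> Tuple[int, int, int]:
--     """Calculate continuous trend from original algorithm"""
--     if len(arr_num) < 2:
--         return (0, 0, 0)
--
--     try:
--         # Remove neighboring duplicates
--         arr_num_unique = []
--         for num in arr_num:
--             if not arr_num_unique or num != arr_num_unique[-1]:
--                 arr_num_unique.append(num)
--
--         if len(arr_num_unique) < 2: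
--             return (0, 0, 0)
--
--         last_num = arr_num_unique[-1]
--         prev_num = arr_num_unique[-2]
--         direction = -1 if last_num < prev_num else (1 if last_num > prev_num else 0)
--
--         tmp_list = [last_num]
--         var = 0
--         n_turn = 0
--
--         if direction == -1:
--             for num in reversed(arr_num_unique[:-1]):
--                 max_num = max(tmp_list)
--                 if num > tmp_list[-1] or num >= max_num - 1:
--                     tmp_list.append(num)
--                     if num >= max_num - 1 and tmp_list.count(max_num) == 1:
--                         n_turn += 1
--                 else:
--                     break
--             var = last_num - max(tmp_list)
--         elif direction == 1:
--             for num in reversed(arr_num_unique[:-1]):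
--                 min_num = min(tmp_list)
--                 if num < tmp_list[-1] or num <= min_num + 1:
--                     tmp_list.append(num)
--                     if num <= min_num + 1:
--                         n_turn += 1
--                 else:
--                     break
--             var = last_num - min(tmp_list)
--
--         return (var, max(0, n_turn - 2), direction)
--
--     except Exception as e:
--         return (0, 0, 0)
-- ===== SOURCE B (Python) =====
-- from typing import Tuple, List
--
-- def _scan_fall(nums: List[int], last: int) -> Tuple[int, int]:
--     # falling trend: walk backwards keeping running max, its multiplicity, prev element
--     cur = last      # running max of the accepted suffix
--     cnt = 1         # occurrences of cur among accepted values
--     tail = last     # value of the previous raw element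
--     n_turn = 0
--     for num in nums:
--         if num == tail:
--             continue            # adjacent duplicate in the raw stream
--         if num > tail or num >= cur - 1:
--             if num >= cur - 1 and (cnt + 1 if num == cur else cnt) == 1:
--                 n_turn += 1
--             if num > cur:
--                 cur, cnt = num, 1
--             elif num == cur:
--                 cnt += 1
--             tail = num
--         else:
--             break
--     return cur, n_turn
--
-- def _scan_rise(nums: List[int], last: int) -> Tuple[int, int]:
--     # rising trend: walk backwards keeping running min and prev element
--     cur = last
--     tail = last
--     n_turn = 0
--     for num in nums:
--         if num == tail:
--             continue
--         if num < tail or num <= cur + 1: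
--             if num <= cur + 1:
--                 n_turn += 1
--             if num < cur:
--                 cur = num
--             tail = num
--         else:
--             break
--     return cur, n_turn
--
-- def _calculate_continuous_trend(arr_num: List[int]) -> Tuple[int, int, int]:
--     if len(arr_num) < 2:
--         return (0, 0, 0)
--     rev = arr_num[::-1]
--     last = rev[0]
--     n = len(rev)
--     k = 1
--     while k < n and rev[k] == last:
--         k += 1
--     if k == n:
--         return (0, 0, 0)
--     if rev[k] > last:
--         cur, n_turn = _scan_fall(rev[k:], last)
--         return (last - cur, max(0, n_turn - 2), -1)
--     else:
--         cur, n_turn = _scan_rise(rev[k:], last)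
--         return (last - cur, max(0, n_turn - 2), 1)
-- ===== Notes on version B (the rewrite author's own statement) =====
-- stated objective: faster
-- what changed: A builds a deduplicated copy of the whole list and, inside its backward loop, recomputes max/min and an element count over a growing list at every step (quadratic); B makes a single backward pass over the raw list, fusing the adjacent-duplicate skip into the pass and maintaining the running max/min, its occurrence count and the previous element as O(1) state.
import Mathlib
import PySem

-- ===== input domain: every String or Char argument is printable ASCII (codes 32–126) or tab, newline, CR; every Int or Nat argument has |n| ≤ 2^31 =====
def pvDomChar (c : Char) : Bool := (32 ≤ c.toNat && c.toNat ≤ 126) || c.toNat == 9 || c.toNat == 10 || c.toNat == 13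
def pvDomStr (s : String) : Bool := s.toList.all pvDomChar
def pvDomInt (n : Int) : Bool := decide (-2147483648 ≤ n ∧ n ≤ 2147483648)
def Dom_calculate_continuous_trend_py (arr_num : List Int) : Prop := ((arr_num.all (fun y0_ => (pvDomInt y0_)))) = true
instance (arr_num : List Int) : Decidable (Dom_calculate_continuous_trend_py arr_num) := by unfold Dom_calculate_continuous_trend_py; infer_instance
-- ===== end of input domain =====

-- B replaces A's quadratic backward loop (fresh max/min + count over a growing list each step)
-- by a single O(n) backward pass with running max/min, multiplicity and previous-element state.


-- ===== PORT A =====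
-- tmp_list[-1]; applied to nonempty lists only (exact there)
def pvLastD (l : List Int) : Int := l.getLastD 0
-- Python max()/min(); applied to nonempty lists only (exact there)
def pvMaxD : List Int → Int
  | [] => 0
  | x :: xs => xs.foldl max x
def pvMinD : List Int → Int
  | [] => 0
  | x :: xs => xs.foldl min x

-- the adjacent-duplicate-removal loop of A
def pvA_dedup (arr : List Int) : List Int :=
  arr.foldl (fun acc num => if acc = [] ∨ num ≠ pvLastD acc then acc ++ [num] else acc) []

-- A's 'direction == -1' for-loop with break, state (tmp_list, n_turn)
def pvA_loopNeg : List Int → List Int → Int → List Int × Int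
  | [], tmp, nturn => (tmp, nturn)
  | num :: rest, tmp, nturn =>
    let maxn := pvMaxD tmp
    if num > pvLastD tmp ∨ num ≥ maxn - 1 then
      let tmp' := tmp ++ [num]
      pvA_loopNeg rest tmp' (if num ≥ maxn - 1 ∧ tmp'.count maxn = 1 then nturn + 1 else nturn)
    else (tmp, nturn)

-- A's 'direction == 1' for-loop with break
def pvA_loopPos : List Int → List Int → Int → List Int × Int
  | [], tmp, nturn => (tmp, nturn)
  | num :: rest, tmp, nturn =>
    let minn := pvMinD tmp
    if num < pvLastD tmp ∨ num ≤ minn + 1 then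
      pvA_loopPos rest (tmp ++ [num]) (if num ≤ minn + 1 then nturn + 1 else nturn)
    else (tmp, nturn)

def calculate_continuous_trend_py (arr_num : List Int) : List Int :=
  if arr_num.length < 2 then [0, 0, 0] else
  let u := pvA_dedup arr_num
  if u.length < 2 then [0, 0, 0] else
  match PySem.List.pyGet? u (-1), PySem.List.pyGet? u (-2) with
  | some last_num, some prev_num =>
    let direction : Int := if last_num < prev_num then -1 else if last_num > prev_num then 1 else 0
    if direction = -1 then
      let r := pvA_loopNeg (u.dropLast).reverse [last_num] 0    -- reversed(arr_num_unique[:-1])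
      [last_num - pvMaxD r.1, max 0 (r.2 - 2), direction]
    else if direction = 1 then
      let r := pvA_loopPos (u.dropLast).reverse [last_num] 0
      [last_num - pvMinD r.1, max 0 (r.2 - 2), direction]
    else [0, max 0 (0 - 2), direction]
  | _, _ => [0, 0, 0]    -- IndexError caught by A's except (unreachable: u.length ≥ 2)

-- ===== PORT B =====
-- B's _scan_fall: state (cur = running max, cnt = its multiplicity, tail = prev element, n_turn)
def pvB_scanFall : List Int → Int → Int → Int → Int → Int × Int
  | [], cur, _cnt, _tail, nturn => (cur, nturn)
  | num :: rest, cur, cnt, tail, nturn =>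
    if num = tail then pvB_scanFall rest cur cnt tail nturn
    else if num > tail ∨ num ≥ cur - 1 then
      let nturn' := if num ≥ cur - 1 ∧ (if num = cur then cnt + 1 else cnt) = 1 then nturn + 1 else nturn
      if num > cur then pvB_scanFall rest num 1 num nturn'
      else if num = cur then pvB_scanFall rest cur (cnt + 1) num nturn'
      else pvB_scanFall rest cur cnt num nturn'
    else (cur, nturn)

-- B's _scan_rise: state (cur = running min, tail, n_turn)
def pvB_scanRise : List Int → Int → Int → Int → Int × Int
  | [], cur, _tail, nturn => (cur, nturn)
  | num :: rest, cur, tail, nturn =>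
    if num = tail then pvB_scanRise rest cur tail nturn
    else if num < tail ∨ num ≤ cur + 1 then
      pvB_scanRise rest (if num < cur then num else cur) num (if num ≤ cur + 1 then nturn + 1 else nturn)
    else (cur, nturn)

def calculate_continuous_trend_py_alt (arr_num : List Int) : List Int :=
  if arr_num.length < 2 then [0, 0, 0] else
  match arr_num.reverse with                               -- rev = arr_num[::-1]
  | [] => [0, 0, 0]                                        -- unreachable (length ≥ 2)
  | last :: rtail =>
    match rtail.dropWhile (fun x => x == last) with        -- the k-advance while loop
    | [] => [0, 0, 0]                                      -- k == n
    | prev :: rest'' =>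
      if prev > last then
        let r := pvB_scanFall (prev :: rest'') last 1 last 0
        [last - r.1, max 0 (r.2 - 2), -1]
      else
        let r := pvB_scanRise (prev :: rest'') last last 0
        [last - r.1, max 0 (r.2 - 2), 1]

-- ===== PRECONDITION & SPEC =====
def Spec_calculate_continuous_trend_py (arr_num : List Int) (out : List Int) : Prop := out = calculate_continuous_trend_py_alt arr_num
instance (arr_num : List Int) (out : List Int) : Decidable (Spec_calculate_continuous_trend_py arr_num out) := by unfold Spec_calculate_continuous_trend_py; infer_instance

-- ===== CLAIM (what is proved, stated in full; the proofs are below) =====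
def Claim_equal_calculate_continuous_trend_py : Prop := ∀ (arr_num : List Int), Dom_calculate_continuous_trend_py arr_num → Spec_calculate_continuous_trend_py arr_num (calculate_continuous_trend_py arr_num)

-- ===== LEMMAS AND PROOFS =====

-- running adjacent-dedup with previous value p
def pvDdp : Int → List Int → List Int
  | _, [] => []
  | p, x :: xs => if x = p then pvDdp p xs else x :: pvDdp x xs

-- forward adjacent-dedup
def pvFD : List Int → List Int
  | [] => []
  | x :: xs => x :: pvDdp x xs

theorem pvDdp_length (p : Int) (l : List Int) : (pvDdp p l).length ≤ l.length := by
  induction l generalizing p with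
  | nil => simp [pvDdp]
  | cons x xs ih =>
    simp only [pvDdp]
    split
    · exact Nat.le_succ_of_le (ih p)
    · simpa using ih x

theorem pvA_dedup_go (l : List Int) : ∀ (acc : List Int), acc ≠ [] →
    l.foldl (fun acc num => if acc = [] ∨ num ≠ pvLastD acc then acc ++ [num] else acc) acc
      = acc ++ pvDdp (pvLastD acc) l := by
  induction l with
  | nil => intro acc h; simp [pvDdp]
  | cons num rest ih =>
    intro acc h
    simp only [List.foldl_cons]
    by_cases hd : num = pvLastD acc
    · have : ¬ (acc = [] ∨ num ≠ pvLastD acc) := by simp [h, hd]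
      rw [if_neg this, ih acc h]
      simp [pvDdp, hd]
    · have : (acc = [] ∨ num ≠ pvLastD acc) := Or.inr hd
      rw [if_pos this, ih (acc ++ [num]) (by simp)]
      have hlast : pvLastD (acc ++ [num]) = num := by
        simp [pvLastD]
      rw [hlast]
      simp [pvDdp, hd, List.append_assoc]

theorem pvA_dedup_eq (arr : List Int) : pvA_dedup arr = pvFD arr := by
  cases arr with
  | nil => rfl
  | cons x xs =>
    unfold pvA_dedup
    simp only [List.foldl_cons, true_or, if_pos, List.nil_append]
    rw [pvA_dedup_go xs [x] (by simp)]
    simp [pvLastD, pvFD]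

theorem pvDdp_append (M : List Int) : ∀ (p x : Int),
    pvDdp p (M ++ [x]) = if x = M.getLastD p then pvDdp p M else pvDdp p M ++ [x] := by
  induction M with
  | nil => intro p x; simp only [List.nil_append, pvDdp, List.getLastD_nil]
  | cons y ys ih =>
    intro p x
    simp only [List.cons_append, pvDdp, List.getLastD_cons]
    by_cases hyp : y = p
    · rw [if_pos hyp, if_pos hyp, ih p x, hyp]
    · rw [if_neg hyp, if_neg hyp, ih y x]
      split <;> simp

theorem pvFD_concat (M : List Int) (x : Int) (h : M ≠ []) :
    pvFD (M ++ [x]) = if x = M.getLastD 0 then pvFD M else pvFD M ++ [x] := by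
  cases M with
  | nil => exact absurd rfl h
  | cons m M' =>
    simp only [List.cons_append, pvFD, List.getLastD_cons]
    rw [pvDdp_append M' m x]
    split <;> simp

theorem pvFD_reverse_aux : ∀ (n : Nat) (L : List Int), L.length ≤ n → pvFD L.reverse = (pvFD L).reverse := by
  intro n
  induction n with
  | zero =>
    intro L h
    have : L = [] := List.eq_nil_of_length_eq_zero (Nat.le_zero.mp h)
    subst this; rfl
  | succ n ih =>
    intro L h
    match L with
    | [] => rfl
    | [x] => simp [pvFD, pvDdp]
    | x :: y :: ys =>
      have h1 : (y :: ys).length ≤ n := by simp at h ⊢; omega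
      have hy := ih (y :: ys) h1
      have hrev : (x :: y :: ys).reverse = (y :: ys).reverse ++ [x] := by simp
      have hne : (y :: ys).reverse ≠ [] := by simp
      have hlast : ((y :: ys).reverse).getLastD 0 = y := by
        rw [List.getLastD_eq_getLast?, List.getLast?_reverse]; rfl
      rw [hrev, pvFD_concat _ _ hne, hlast, hy]
      by_cases hxy : x = y
      · rw [if_pos hxy]; subst hxy; simp [pvFD, pvDdp]
      · rw [if_neg hxy]
        have : pvFD (x :: y :: ys) = x :: pvFD (y :: ys) := by
          simp [pvFD, pvDdp, Ne.symm hxy]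
        rw [this]; simp

theorem pvFD_reverse (L : List Int) : pvFD L.reverse = (pvFD L).reverse :=
  pvFD_reverse_aux L.length L le_rfl

theorem pvDdp_dropWhile (p : Int) (l : List Int) :
    pvDdp p (l.dropWhile (fun x => x == p)) = pvDdp p l := by
  induction l with
  | nil => rfl
  | cons x xs ih =>
    by_cases hx : x = p
    · simp [List.dropWhile_cons, hx, pvDdp, ih]
    · simp [List.dropWhile_cons, hx, pvDdp]

theorem pvDdp_idem (p : Int) (l : List Int) : pvDdp p (pvDdp p l) = pvDdp p l := by
  induction l generalizing p with
  | nil => rfl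
  | cons x xs ih =>
    by_cases hx : x = p
    · simp [pvDdp, hx, ih]
    · simp [pvDdp, hx, ih x]

theorem pvB_scanFall_ddp (l : List Int) : ∀ (cur cnt tail nt : Int),
    pvB_scanFall l cur cnt tail nt = pvB_scanFall (pvDdp tail l) cur cnt tail nt := by
  induction l with
  | nil => intro cur cnt tail nt; rfl
  | cons num rest ih =>
    intro cur cnt tail nt
    by_cases h1 : num = tail
    · simp only [pvB_scanFall, pvDdp, if_pos h1]
      exact ih cur cnt tail nt
    · simp only [pvB_scanFall, pvDdp, if_neg h1]
      split
      · split
        · exact ih _ _ _ _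
        · split <;> exact ih _ _ _ _
      · rfl

theorem pvB_scanRise_ddp (l : List Int) : ∀ (cur tail nt : Int),
    pvB_scanRise l cur tail nt = pvB_scanRise (pvDdp tail l) cur tail nt := by
  induction l with
  | nil => intro cur tail nt; rfl
  | cons num rest ih =>
    intro cur tail nt
    by_cases h1 : num = tail
    · simp only [pvB_scanRise, pvDdp, if_pos h1]
      exact ih cur tail nt
    · simp only [pvB_scanRise, pvDdp, if_neg h1]
      split
      · exact ih _ _ _
      · rfl

theorem pvMaxD_concat (tmp : List Int) (num : Int) (h : tmp ≠ []) :
    pvMaxD (tmp ++ [num]) = max (pvMaxD tmp) num := by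
  cases tmp with
  | nil => exact absurd rfl h
  | cons x xs => simp [pvMaxD, List.foldl_append]

theorem pvMinD_concat (tmp : List Int) (num : Int) (h : tmp ≠ []) :
    pvMinD (tmp ++ [num]) = min (pvMinD tmp) num := by
  cases tmp with
  | nil => exact absurd rfl h
  | cons x xs => simp [pvMinD, List.foldl_append]

theorem pvMaxD_mem_le (tmp : List Int) (x : Int) (hx : x ∈ tmp) : x ≤ pvMaxD tmp := by
  cases tmp with
  | nil => simp at hx
  | cons y ys =>
    rcases List.mem_cons.mp hx with h | h
    · subst h; exact (PySem.List.le_foldl_max ys x).1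
    · exact (PySem.List.le_foldl_max ys y).2 x h

theorem pvA_loopNeg_eq_scanFall (L : List Int) : ∀ (tmp : List Int) (nt : Int), tmp ≠ [] →
    pvDdp (pvLastD tmp) L = L →
    pvB_scanFall L (pvMaxD tmp) ((tmp.count (pvMaxD tmp) : Int)) (pvLastD tmp) nt
      = (pvMaxD (pvA_loopNeg L tmp nt).1, (pvA_loopNeg L tmp nt).2) := by
  induction L with
  | nil => intro tmp nt h hL; rfl
  | cons num rest ih =>
    intro tmp nt h hL
    have hne : num ≠ pvLastD tmp := by
      intro he
      rw [show pvDdp (pvLastD tmp) (num :: rest) = pvDdp (pvLastD tmp) rest from by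
        simp [pvDdp, he]] at hL
      have h1 := pvDdp_length (pvLastD tmp) rest
      have h2 := congrArg List.length hL
      simp at h2; omega
    simp only [pvDdp, if_neg hne] at hL
    have hrest : pvDdp num rest = rest := by injection hL
    have htmp' : tmp ++ [num] ≠ [] := by simp
    have hlast' : pvLastD (tmp ++ [num]) = num := by simp [pvLastD]
    have hcnt : ((tmp ++ [num]).count (pvMaxD tmp) : Int)
        = (if num = pvMaxD tmp then ((tmp.count (pvMaxD tmp) : Int)) + 1 else ((tmp.count (pvMaxD tmp) : Int))) := by
      by_cases hnm : num = pvMaxD tmp <;>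
        simp [List.count_append, List.count_cons, hnm]
    have hcond : (num ≥ pvMaxD tmp - 1 ∧ (tmp ++ [num]).count (pvMaxD tmp) = 1)
        ↔ (num ≥ pvMaxD tmp - 1 ∧ (if num = pvMaxD tmp then ((tmp.count (pvMaxD tmp) : Int)) + 1 else ((tmp.count (pvMaxD tmp) : Int))) = 1) := by
      rw [← hcnt]; constructor <;> (rintro ⟨ha, hb⟩; exact ⟨ha, by omega⟩)
    simp only [pvA_loopNeg, pvB_scanFall, if_neg hne]
    by_cases hc : num > pvLastD tmp ∨ num ≥ pvMaxD tmp - 1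
    · rw [if_pos hc, if_pos hc]
      have hnt : (if num ≥ pvMaxD tmp - 1 ∧ (if num = pvMaxD tmp then ((tmp.count (pvMaxD tmp) : Int)) + 1 else ((tmp.count (pvMaxD tmp) : Int))) = 1 then nt + 1 else nt)
          = (if num ≥ pvMaxD tmp - 1 ∧ (tmp ++ [num]).count (pvMaxD tmp) = 1 then nt + 1 else nt) :=
        if_congr hcond.symm rfl rfl
      rw [hnt]
      set ntA := if num ≥ pvMaxD tmp - 1 ∧ (tmp ++ [num]).count (pvMaxD tmp) = 1 then nt + 1 else nt with hntA
      have hih := ih (tmp ++ [num]) ntA htmp' (by rw [hlast']; exact hrest)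
      rcases lt_trichotomy num (pvMaxD tmp) with hlt | heq | hgt
      · -- num < max: max and count unchanged
        have h1 : pvMaxD (tmp ++ [num]) = pvMaxD tmp := by
          rw [pvMaxD_concat _ _ h]; exact max_eq_left hlt.le
        have h2 : ((tmp ++ [num]).count (pvMaxD (tmp ++ [num])) : Int) = ((tmp.count (pvMaxD tmp) : Int)) := by
          rw [h1]; rw [hcnt]; rw [if_neg (by omega)]
        rw [h2, h1, hlast'] at hih
        rw [if_neg (by omega : ¬ num > pvMaxD tmp), if_neg (by omega : ¬ num = pvMaxD tmp)]
        exact hih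
      · -- num = max: count increments
        have h1 : pvMaxD (tmp ++ [num]) = pvMaxD tmp := by
          rw [pvMaxD_concat _ _ h, heq]; exact max_self _
        have h2 : ((tmp ++ [num]).count (pvMaxD (tmp ++ [num])) : Int) = ((tmp.count (pvMaxD tmp) : Int)) + 1 := by
          rw [h1, hcnt, if_pos heq]
        rw [h2, h1, hlast'] at hih
        rw [if_neg (by omega : ¬ num > pvMaxD tmp), if_pos heq]
        exact hih
      · -- num > max: new max with count 1
        have h1 : pvMaxD (tmp ++ [num]) = num := by
          rw [pvMaxD_concat _ _ h]; exact max_eq_right hgt.le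
        have h0 : tmp.count num = 0 :=
          List.count_eq_zero.mpr (fun hm => absurd (pvMaxD_mem_le tmp num hm) (not_le.mpr hgt))
        have h2 : ((tmp ++ [num]).count (pvMaxD (tmp ++ [num])) : Int) = 1 := by
          rw [h1]; simp [List.count_append, h0]
        rw [h2, h1, hlast'] at hih
        rw [if_pos hgt]
        exact hih
    · rw [if_neg hc, if_neg hc]

theorem pvA_loopPos_eq_scanRise (L : List Int) : ∀ (tmp : List Int) (nt : Int), tmp ≠ [] →
    pvDdp (pvLastD tmp) L = L →
    pvB_scanRise L (pvMinD tmp) (pvLastD tmp) nt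
      = (pvMinD (pvA_loopPos L tmp nt).1, (pvA_loopPos L tmp nt).2) := by
  induction L with
  | nil => intro tmp nt h hL; rfl
  | cons num rest ih =>
    intro tmp nt h hL
    have hne : num ≠ pvLastD tmp := by
      intro he
      rw [show pvDdp (pvLastD tmp) (num :: rest) = pvDdp (pvLastD tmp) rest from by
        simp [pvDdp, he]] at hL
      have h1 := pvDdp_length (pvLastD tmp) rest
      have h2 := congrArg List.length hL
      simp at h2; omega
    simp only [pvDdp, if_neg hne] at hL
    have hrest : pvDdp num rest = rest := by injection hL
    have htmp' : tmp ++ [num] ≠ [] := by simp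
    have hlast' : pvLastD (tmp ++ [num]) = num := by simp [pvLastD]
    simp only [pvA_loopPos, pvB_scanRise, if_neg hne]
    by_cases hc : num < pvLastD tmp ∨ num ≤ pvMinD tmp + 1
    · rw [if_pos hc, if_pos hc]
      have hih := ih (tmp ++ [num]) (if num ≤ pvMinD tmp + 1 then nt + 1 else nt) htmp'
        (by rw [hlast']; exact hrest)
      have h1 : pvMinD (tmp ++ [num]) = if num < pvMinD tmp then num else pvMinD tmp := by
        rw [pvMinD_concat _ _ h]
        rcases lt_or_ge num (pvMinD tmp) with hlt | hge
        · rw [if_pos hlt]; exact min_eq_right hlt.le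
        · rw [if_neg (not_lt.mpr hge)]; exact min_eq_left hge
      rw [h1, hlast'] at hih
      exact hih
    · rw [if_neg hc, if_neg hc]

-- ===== VERDICT (by name: the statement is the Claim_ definition above) =====
theorem pvDropWhile_head_ne (r0 prev : Int) (rtail : List Int) : ∀ (rest2 : List Int),
    rtail.dropWhile (fun x => x == r0) = prev :: rest2 → prev ≠ r0 := by
  induction rtail with
  | nil => intro r h; simp at h
  | cons x xs ih =>
    intro r h
    rw [List.dropWhile_cons] at h
    by_cases hx : x = r0
    · rw [if_pos (by simp [hx])] at h; exact ih r h
    · rw [if_neg (by simp [hx])] at h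
      obtain ⟨h1, -⟩ := List.cons.injEq .. ▸ h
      exact h1 ▸ hx

theorem calculate_continuous_trend_py_spec : Claim_equal_calculate_continuous_trend_py := by
  intro arr _dom
  unfold Spec_calculate_continuous_trend_py calculate_continuous_trend_py calculate_continuous_trend_py_alt
  by_cases hlen : arr.length < 2
  · rw [if_pos hlen, if_pos hlen]
  · rw [if_neg hlen, if_neg hlen]
    have harr : arr ≠ [] := by intro he; subst he; simp at hlen
    obtain ⟨r0, rtail, hrev⟩ : ∃ r0 rtail, arr.reverse = r0 :: rtail := by
      cases hr : arr.reverse with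
      | nil => exact absurd (List.reverse_eq_nil_iff.mp hr) harr
      | cons a t => exact ⟨a, t, rfl⟩
    have hur : (pvFD arr).reverse = r0 :: pvDdp r0 rtail := by
      rw [← pvFD_reverse, hrev]; rfl
    rw [pvA_dedup_eq arr]
    simp only [hrev]
    cases hdw : rtail.dropWhile (fun x => x == r0) with
    | nil =>
      have hdd : pvDdp r0 rtail = [] := by
        rw [← pvDdp_dropWhile r0 rtail, hdw]; rfl
      have hfd : pvFD arr = [r0] := by
        have h5 : (pvFD arr).reverse = [r0] := by rw [hur, hdd]
        simpa using congrArg List.reverse h5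
      rw [hfd]
      norm_num
    | cons prev rest2 =>
      have hpr : prev ≠ r0 := pvDropWhile_head_ne r0 prev rtail rest2 hdw
      have hddp : pvDdp r0 rtail = prev :: pvDdp prev rest2 := by
        rw [← pvDdp_dropWhile r0 rtail, hdw]
        simp [pvDdp, hpr]
      have hfd2 : pvFD arr = (pvDdp prev rest2).reverse ++ [prev, r0] := by
        have h5 : (pvFD arr).reverse = r0 :: prev :: pvDdp prev rest2 := by rw [hur, hddp]
        simpa using congrArg List.reverse h5
      have hlen2 : ¬ (pvFD arr).length < 2 := by rw [hfd2]; simp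
      rw [if_neg hlen2]
      have hg1 : PySem.List.pyGet? (pvFD arr) (-1) = some r0 := by
        rw [PySem.List.pyGet?_neg_one, hfd2,
          show (pvDdp prev rest2).reverse ++ [prev, r0]
            = ((pvDdp prev rest2).reverse ++ [prev]) ++ [r0] by simp]
        exact List.getLast?_concat
      have hg2 : PySem.List.pyGet? (pvFD arr) (-2) = some prev := by
        rw [PySem.List.pyGet?_neg_ofNat (pvFD arr) 2 (by norm_num) (by rw [hfd2]; simp)]
        rw [hfd2]
        have h6 : ((pvDdp prev rest2).reverse ++ [prev, r0]).length - 2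
            = (pvDdp prev rest2).reverse.length := by simp
        rw [h6, List.getElem?_append_right (le_refl _)]
        simp
      rw [hg1, hg2]
      simp only [gt_iff_lt]
      have hdl : ((pvFD arr).dropLast).reverse = prev :: pvDdp prev rest2 := by
        rw [hfd2, show (pvDdp prev rest2).reverse ++ [prev, r0]
          = ((pvDdp prev rest2).reverse ++ [prev]) ++ [r0] by simp, List.dropLast_concat]
        simp
      have hddp2 : pvDdp r0 (prev :: pvDdp prev rest2) = prev :: pvDdp prev rest2 := by
        simp [pvDdp, hpr, pvDdp_idem]
      by_cases hc : r0 < prev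
      · -- falling trend: direction = -1
        simp only [if_pos hc, hdl, reduceIte]
        have hscan : pvB_scanFall (prev :: rest2) r0 1 r0 0
            = (pvMaxD (pvA_loopNeg (prev :: pvDdp prev rest2) [r0] 0).1,
               (pvA_loopNeg (prev :: pvDdp prev rest2) [r0] 0).2) := by
          rw [pvB_scanFall_ddp, show pvDdp r0 (prev :: rest2) = prev :: pvDdp prev rest2 by
            simp [pvDdp, hpr]]
          have h8 : pvDdp (pvLastD [r0]) (prev :: pvDdp prev rest2)
              = prev :: pvDdp prev rest2 := by
            simpa [pvLastD] using hddp2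
          simpa [pvMaxD, pvLastD] using
            pvA_loopNeg_eq_scanFall (prev :: pvDdp prev rest2) [r0] 0 (by simp) h8
        rw [hscan]
      · -- rising trend: direction = 1
        have hlt : prev < r0 := lt_of_le_of_ne (not_lt.mp hc) hpr
        simp only [if_neg hc, if_pos hlt, hdl, reduceIte]
        norm_num
        have hscan : pvB_scanRise (prev :: rest2) r0 r0 0
            = (pvMinD (pvA_loopPos (prev :: pvDdp prev rest2) [r0] 0).1,
               (pvA_loopPos (prev :: pvDdp prev rest2) [r0] 0).2) := by
          rw [pvB_scanRise_ddp, show pvDdp r0 (prev :: rest2) = prev :: pvDdp prev rest2 by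
            simp [pvDdp, hpr]]
          have h8 : pvDdp (pvLastD [r0]) (prev :: pvDdp prev rest2)
              = prev :: pvDdp prev rest2 := by
            simpa [pvLastD] using hddp2
          simpa [pvMinD, pvLastD] using
            pvA_loopPos_eq_scanRise (prev :: pvDdp prev rest2) [r0] 0 (by simp) h8
        rw [hscan]
        simp
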